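-- pv_equiv track=rewrite | github.com/mittgaurav/Pietone | array_problems_2.py | string_in_order
-- ===== SOURCE A (Python) =====
-- def string_in_order(order, string):
--     """given order, check if chars
--     in string follow that order"""
--     if not string: return True
--     if not order:  return True
--
--     ordered_set = set(order)
--     j = 0
--     for char in string:
--         if char not in ordered_set: continue
--
--         # increment till we reach
--         # char in the given order
--         while j < len(order) and order[j] != char:
--             j += 1
--
--         if j == len(order):
--             return False
--
--     return True
-- ===== SOURCE B (Python) =====
-- def string_in_order(order, string):
--     """given order, check if chars
--     in string follow that order"""
--     if not string: return True
--     if not order:  return True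
--
--     # index: each char of order -> ascending list of its positions
--     positions = {}
--     for i, c in enumerate(order):
--         positions.setdefault(c, []).append(i)
--
--     j = 0
--     for char in string:
--         ps = positions.get(char)
--         if ps is None:
--             continue
--         # binary search: smallest k with ps[k] >= j
--         lo, hi = 0, len(ps)
--         while lo < hi:
--             mid = (lo + hi) // 2
--             if ps[mid] < j:
--                 lo = mid + 1
--             else:
--                 hi = mid
--         if lo == len(ps):
--             return False
--         j = ps[lo]
--     return True
-- ===== Notes on version B (the rewrite author's own statement) =====
-- stated objective: alternative
-- what changed: B builds a positions index (char -> ascending list of its indices in order) once and replaces A's step-by-step advancing of the pointer j through order with a hand-written binary search for the first occurrence index >= j in that char's occurrence list.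
import Mathlib
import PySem

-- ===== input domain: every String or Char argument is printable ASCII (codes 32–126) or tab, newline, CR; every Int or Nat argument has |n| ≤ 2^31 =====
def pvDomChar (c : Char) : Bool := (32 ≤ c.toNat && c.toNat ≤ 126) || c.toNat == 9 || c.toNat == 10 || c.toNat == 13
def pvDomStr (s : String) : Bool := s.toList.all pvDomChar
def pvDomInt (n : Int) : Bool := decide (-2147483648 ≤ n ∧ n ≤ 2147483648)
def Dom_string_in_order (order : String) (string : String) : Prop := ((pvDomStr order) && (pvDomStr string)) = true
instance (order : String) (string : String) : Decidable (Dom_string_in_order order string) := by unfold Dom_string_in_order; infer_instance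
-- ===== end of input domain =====

-- B replaces A's step-by-step pointer advance through `order` by a per-char positions
-- index plus a hand-written binary search (alternative decomposition, no speed claim).

-- ===== PORT A =====
-- the `while j < len(order) and order[j] != char: j += 1` loop
def pvAdvance (o : List Char) (c : Char) (j : Nat) : Nat :=
  if h : j < o.length ∧ o[j]? ≠ some c then pvAdvance o c (j + 1) else j
termination_by o.length - j
decreasing_by omega

-- the `for char in string` loop of A, state j
def pvALoop (o : List Char) (oset : PySem.Set Char) : List Char → Nat → Bool
  | [], _ => true
  | c :: rest, j =>
    if !(PySem.Set.contains oset c) then pvALoop o oset rest j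
    else
      let j' := pvAdvance o c j
      if j' = o.length then false else pvALoop o oset rest j'

def string_in_order (order : String) (string : String) : Bool :=
  if string.toList.isEmpty then true
  else if order.toList.isEmpty then true
  else pvALoop order.toList (PySem.Set.ofList order.toList) string.toList 0

-- ===== PORT B =====
-- `positions.setdefault(c, []).append(i)` over enumerate(order)
def pvBuild (d : PySem.Dict Char (List Nat)) (i : Nat) : List Char → PySem.Dict Char (List Nat)
  | [] => d
  | c :: rest =>
    let d' := match d.get? c with
      | none => d.insert c [i]
      | some l => d.insert c (l ++ [i])
    pvBuild d' (i + 1) rest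

-- the `while lo < hi` binary-search loop of B
def pvBisect (ps : List Nat) (j : Nat) (lo hi : Nat) : Nat :=
  if h : lo < hi then
    let mid := (lo + hi) / 2
    if ps.getD mid 0 < j then pvBisect ps j (mid + 1) hi else pvBisect ps j lo mid
  else lo
termination_by hi - lo
decreasing_by all_goals omega

-- the `for char in string` loop of B, state j
def pvBLoop (pos : PySem.Dict Char (List Nat)) : List Char → Nat → Bool
  | [], _ => true
  | c :: rest, j =>
    match pos.get? c with
    | none => pvBLoop pos rest j
    | some ps =>
      let lo := pvBisect ps j 0 ps.length
      -- `if lo == len(ps): return False; j = ps[lo]`; lo < len(ps) here, so getD is exact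
      if lo = ps.length then false else pvBLoop pos rest (ps.getD lo 0)

def string_in_order_alt (order : String) (string : String) : Bool :=
  if string.toList.isEmpty then true
  else if order.toList.isEmpty then true
  else pvBLoop (pvBuild PySem.Dict.empty 0 order.toList) string.toList 0

-- ===== PRECONDITION & SPEC =====
def Spec_string_in_order (order : String) (string : String) (out : Bool) : Prop := out = string_in_order_alt order string
instance (order : String) (string : String) (out : Bool) : Decidable (Spec_string_in_order order string out) := by unfold Spec_string_in_order; infer_instance

-- ===== CLAIM (what is proved, stated in full; the proofs are below) =====
def Claim_equal_string_in_order : Prop := ∀ (order : String) (string : String), Dom_string_in_order order string → Spec_string_in_order order string (string_in_order order string)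


-- ===== LEMMAS AND PROOFS =====

-- index of the first occurrence of c in xs (xs.length if absent)
def pvFirstOcc : List Char → Char → Nat
  | [], _ => 0
  | x :: xs, c => if x = c then 0 else pvFirstOcc xs c + 1

-- the ascending list of positions of c in xs, shifted by i
def pvIdxs : List Char → Char → Nat → List Nat
  | [], _, _ => []
  | x :: xs, c, i => if x = c then i :: pvIdxs xs c (i + 1) else pvIdxs xs c (i + 1)

theorem pvFirstOcc_le (xs : List Char) (c : Char) : pvFirstOcc xs c ≤ xs.length := by
  induction xs with
  | nil => simp [pvFirstOcc]
  | cons x xs ih => by_cases h : x = c <;> simp [pvFirstOcc, h] <;> omega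

theorem pvIdxs_eq_nil (xs : List Char) (c : Char) : ∀ i, (pvIdxs xs c i = [] ↔ c ∉ xs) := by
  induction xs with
  | nil => simp [pvIdxs]
  | cons x xs ih =>
    intro i
    by_cases h : x = c
    · subst h; simp [pvIdxs]
    · rw [pvIdxs, if_neg h, ih (i + 1)]
      simp [List.mem_cons, Ne.symm h]

theorem pvIdxs_bound (xs : List Char) (c : Char) : ∀ i, ∀ p ∈ pvIdxs xs c i, i ≤ p := by
  induction xs with
  | nil => simp [pvIdxs]
  | cons x xs ih =>
    intro i p hp
    by_cases h : x = c <;> simp only [pvIdxs, h, if_true, if_false, List.mem_cons] at hp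
    · rcases hp with rfl | hp
      · exact le_refl _
      · exact Nat.le_of_succ_le (ih (i + 1) p hp)
    · exact Nat.le_of_succ_le (ih (i + 1) p hp)

theorem pvIdxs_pairwise (xs : List Char) (c : Char) : ∀ i, (pvIdxs xs c i).Pairwise (· < ·) := by
  induction xs with
  | nil => simp [pvIdxs]
  | cons x xs ih =>
    intro i
    by_cases h : x = c <;> simp only [pvIdxs, h, if_true, if_false, List.pairwise_cons]
    · exact ⟨fun p hp => Nat.lt_of_succ_le (pvIdxs_bound xs c (i + 1) p hp), ih (i + 1)⟩
    · exact ih (i + 1)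

theorem pvAdvance_eq (o : List Char) (c : Char) : ∀ j, j ≤ o.length →
    pvAdvance o c j = j + pvFirstOcc (o.drop j) c := by
  intro j hj
  induction hn : o.length - j using Nat.strong_induction_on generalizing j with
  | _ n ih =>
    rw [pvAdvance]
    by_cases hlt : j < o.length
    · have hdrop : o.drop j = o[j] :: o.drop (j + 1) := List.drop_eq_getElem_cons hlt
      by_cases hc : o[j] = c
      · have hcnd : ¬ (j < o.length ∧ o[j]? ≠ some c) := by
          simp [List.getElem?_eq_getElem hlt, hc]
        rw [dif_neg hcnd, hdrop]
        simp [pvFirstOcc, hc]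
      · have hcnd : j < o.length ∧ o[j]? ≠ some c := by
          simp [List.getElem?_eq_getElem hlt, hc, hlt]
        rw [dif_pos hcnd]
        have := ih (o.length - (j + 1)) (by omega) (j + 1) (by omega) rfl
        rw [this, hdrop]
        simp [pvFirstOcc, hc]
        omega
    · have hcnd : ¬ (j < o.length ∧ o[j]? ≠ some c) := by simp [hlt]
      rw [dif_neg hcnd, List.drop_eq_nil_of_le (by omega)]
      simp [pvFirstOcc]

theorem pvFind?_congr {α : Type} (f g : α → Bool) :
    ∀ l : List α, (∀ x ∈ l, f x = g x) → l.find? f = l.find? g := by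
  intro l
  induction l with
  | nil => simp
  | cons x xs ih =>
    intro h
    rw [List.find?_cons, List.find?_cons, h x (by simp)]
    cases g x
    · exact ih (fun y hy => h y (by simp [hy]))
    · rfl

-- find? over the positions list, characterised through pvFirstOcc of the dropped suffix
theorem pvFind_idxs (c : Char) (xs : List Char) : ∀ i j : Nat,
    (pvIdxs xs c i).find? (fun p => decide (j ≤ p)) =
      if pvFirstOcc (xs.drop (j - i)) c < (xs.drop (j - i)).length
      then some (max j i + pvFirstOcc (xs.drop (j - i)) c) else none := by
  induction xs with
  | nil => intro i j; simp [pvIdxs, pvFirstOcc]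
  | cons x xs ih =>
    intro i j
    by_cases hji : j ≤ i
    · have h0 : j - i = 0 := by omega
      rw [h0]
      by_cases h : x = c
      · subst h
        rw [pvIdxs, if_pos rfl, List.find?_cons, decide_eq_true hji]
        simp [pvFirstOcc, Nat.max_eq_right hji]
      · rw [pvIdxs, if_neg h]
        have hcong : (pvIdxs xs c (i + 1)).find? (fun p => decide (j ≤ p))
            = (pvIdxs xs c (i + 1)).find? (fun p => decide (i + 1 ≤ p)) := by
          apply pvFind?_congr
          intro p hp
          have := pvIdxs_bound xs c (i + 1) p hp
          simp only [decide_eq_decide]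
          omega
        have hih := ih (i + 1) (i + 1)
        rw [Nat.sub_self] at hih
        rw [hcong, hih, List.drop_zero, List.drop_zero]
        rw [pvFirstOcc, if_neg h]
        split_ifs with h1 h2 h2 <;> simp at * <;> omega
    · -- i < j
      have hd : (x :: xs).drop (j - i) = xs.drop (j - (i + 1)) := by
        have hji' : j - i = (j - (i + 1)) + 1 := by omega
        rw [hji', List.drop_succ_cons]
      by_cases h : x = c
      · subst h
        rw [pvIdxs, if_pos rfl, List.find?_cons, decide_eq_false (by omega), hd,
          ih (i + 1) j, Nat.max_eq_left (by omega), Nat.max_eq_left (by omega)]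
      · rw [pvIdxs, if_neg h, hd, ih (i + 1) j,
          Nat.max_eq_left (by omega), Nat.max_eq_left (by omega)]

theorem pvBuild_get (c : Char) (xs : List Char) : ∀ (d : PySem.Dict Char (List Nat)) (i : Nat),
    (pvBuild d i xs).get? c =
      match d.get? c with
      | none => if pvIdxs xs c i = [] then none else some (pvIdxs xs c i)
      | some l => some (l ++ pvIdxs xs c i) := by
  induction xs with
  | nil =>
    intro d i
    cases h : d.get? c <;> simp [pvBuild, pvIdxs, h]
  | cons x xs ih =>
    intro d i
    by_cases hx : x = c
    · subst hx
      cases h : d.get? x with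
      | none =>
        simp only [pvBuild, h]
        rw [ih]
        rw [PySem.Dict.get?_insert]
        simp [pvIdxs]
      | some l =>
        simp only [pvBuild, h]
        rw [ih]
        rw [PySem.Dict.get?_insert]
        simp [pvIdxs, List.append_assoc]
    · have hget : ∀ (d' : PySem.Dict Char (List Nat)) (v : List Nat),
          (d'.insert x v).get? c = d'.get? c := by
        intro d' v
        rw [PySem.Dict.get?_insert, if_neg (Ne.symm hx)]
      have hidxs : pvIdxs (x :: xs) c i = pvIdxs xs c (i + 1) := by
        rw [pvIdxs, if_neg hx]
      cases h : d.get? x with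
      | none =>
        simp only [pvBuild, h]
        rw [ih, hget, hidxs]
      | some l =>
        simp only [pvBuild, h]
        rw [ih, hget, hidxs]

-- binary-search loop correctness (ps ascending)
theorem pvBisect_correct (ps : List Nat) (j : Nat) (hs : ps.Pairwise (· ≤ ·)) :
    ∀ lo hi, hi ≤ ps.length → lo ≤ hi →
    (∀ i, i < lo → ps.getD i 0 < j) → (∀ i, hi ≤ i → i < ps.length → j ≤ ps.getD i 0) →
    lo ≤ pvBisect ps j lo hi ∧ pvBisect ps j lo hi ≤ hi ∧
    (∀ i, i < pvBisect ps j lo hi → ps.getD i 0 < j) ∧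
    (∀ i, pvBisect ps j lo hi ≤ i → i < ps.length → j ≤ ps.getD i 0) := by
  have hmono : ∀ a b, a ≤ b → b < ps.length → ps.getD a 0 ≤ ps.getD b 0 := by
    intro a b hab hb
    rcases Nat.eq_or_lt_of_le hab with rfl | hlt
    · exact le_refl _
    · have := List.pairwise_iff_getElem.mp hs a b (by omega) hb hlt
      rw [List.getD_eq_getElem _ _ (by omega), List.getD_eq_getElem _ _ hb]
      exact this
  intro lo hi hhi hlh hlo hhiP
  induction hn : hi - lo using Nat.strong_induction_on generalizing lo hi with
  | _ n ih =>
    rw [pvBisect]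
    by_cases h : lo < hi
    · rw [dif_pos h]
      by_cases hc : ps.getD ((lo + hi) / 2) 0 < j
      · rw [if_pos hc]
        have hlo' : ∀ i, i < (lo + hi) / 2 + 1 → ps.getD i 0 < j := by
          intro i hi'
          by_cases hil : i < lo
          · exact hlo i hil
          · exact lt_of_le_of_lt (hmono i ((lo + hi) / 2) (by omega) (by omega)) hc
        exact ih (hi - ((lo + hi) / 2 + 1)) (by omega) ((lo + hi) / 2 + 1) hi hhi
          (by omega) hlo' hhiP rfl |>.imp (by omega) id
      · rw [if_neg hc]
        have hhi' : ∀ i, (lo + hi) / 2 ≤ i → i < ps.length → j ≤ ps.getD i 0 := by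
          intro i hmi hiP
          exact le_trans (Nat.le_of_not_lt hc) (hmono ((lo + hi) / 2) i hmi hiP)
        have := ih ((lo + hi) / 2 - lo) (by omega) lo ((lo + hi) / 2) (by omega)
          (by omega) hlo hhi' rfl
        exact ⟨this.1, by omega, this.2.2⟩
    · rw [dif_neg h]
      have hle : lo = hi := by omega
      exact ⟨le_refl _, le_of_eq hle, hlo, fun i h1 h2 => hhiP i (by omega) h2⟩

-- the bisect result read back as find?
theorem pvBisect_find (ps : List Nat) (j : Nat) (hs : ps.Pairwise (· ≤ ·)) :
    (if pvBisect ps j 0 ps.length = ps.length then none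
     else some (ps.getD (pvBisect ps j 0 ps.length) 0))
      = ps.find? (fun p => decide (j ≤ p)) := by
  obtain ⟨-, hle, hlt, hge⟩ := pvBisect_correct ps j hs 0 ps.length le_rfl (Nat.zero_le _)
    (fun i hi => absurd hi (Nat.not_lt_zero i)) (fun i h1 h2 => absurd h2 (by omega))
  by_cases hr : pvBisect ps j 0 ps.length = ps.length
  · rw [if_pos hr]
    symm
    rw [List.find?_eq_none]
    intro x hx
    obtain ⟨k, hk, hkx⟩ := List.mem_iff_getElem.mp hx
    have := hlt k (by omega)
    rw [List.getD_eq_getElem _ _ hk, hkx] at this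
    simp
    omega
  · have hrlt : pvBisect ps j 0 ps.length < ps.length := by omega
    rw [if_neg hr]
    conv_rhs => rw [← List.take_append_drop (pvBisect ps j 0 ps.length) ps]
    rw [List.find?_append]
    have h1 : (ps.take (pvBisect ps j 0 ps.length)).find? (fun p => decide (j ≤ p)) = none := by
      rw [List.find?_eq_none]
      intro x hx
      obtain ⟨k, hk, hkx⟩ := List.mem_iff_getElem.mp hx
      rw [List.getElem_take] at hkx
      have hkr : k < pvBisect ps j 0 ps.length := by
        simp at hk
        omega
      have := hlt k hkr
      rw [List.getD_eq_getElem _ _ (by omega), hkx] at this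
      simp
      omega
    rw [h1, Option.none_or, List.drop_eq_getElem_cons hrlt, List.find?_cons]
    have h2 : decide (j ≤ ps[pvBisect ps j 0 ps.length]) = true := by
      have := hge (pvBisect ps j 0 ps.length) le_rfl hrlt
      rw [List.getD_eq_getElem _ _ hrlt] at this
      simpa using this
    rw [h2, List.getD_eq_getElem _ _ hrlt]

theorem pvSet_contains (o : List Char) (c : Char) :
    PySem.Set.contains (PySem.Set.ofList o) c = decide (c ∈ o) := by
  simp [PySem.Set.contains, List.contains_eq_mem, PySem.Set.mem_ofList]

theorem pvLoop_eq (o : List Char) : ∀ (s : List Char) (j : Nat), j ≤ o.length →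
    pvALoop o (PySem.Set.ofList o) s j = pvBLoop (pvBuild PySem.Dict.empty 0 o) s j := by
  intro s
  induction s with
  | nil => intro j hj; rfl
  | cons c rest ih =>
    intro j hj
    by_cases hc : c ∈ o
    · have hne : ¬ pvIdxs o c 0 = [] := by rw [pvIdxs_eq_nil]; simp [hc]
      have hget : (pvBuild PySem.Dict.empty 0 o).get? c = some (pvIdxs o c 0) := by
        rw [pvBuild_get]
        simp [PySem.Dict.get?_empty, hne]
      have hsorted : (pvIdxs o c 0).Pairwise (· ≤ ·) :=
        (pvIdxs_pairwise o c 0).imp (fun h => Nat.le_of_lt h)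
      have hfind := pvBisect_find (pvIdxs o c 0) j hsorted
      have hidx := pvFind_idxs c o 0 j
      rw [Nat.sub_zero, Nat.max_eq_left (Nat.zero_le j)] at hidx
      have hadv := pvAdvance_eq o c j hj
      have hdl : (o.drop j).length = o.length - j := List.length_drop
      rw [pvALoop, pvBLoop, hget, pvSet_contains, decide_eq_true hc]
      simp only [Bool.not_true, Bool.false_eq_true, if_false]
      by_cases hcase : pvFirstOcc (o.drop j) c < (o.drop j).length
      · have hfound : (pvIdxs o c 0).find? (fun p => decide (j ≤ p))
            = some (j + pvFirstOcc (o.drop j) c) := by rw [hidx, if_pos hcase]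
        rw [hfound] at hfind
        have hrne : ¬ pvBisect (pvIdxs o c 0) j 0 (pvIdxs o c 0).length = (pvIdxs o c 0).length := by
          intro hab
          rw [if_pos hab] at hfind
          simp at hfind
        rw [if_neg hrne] at hfind
        have hgd : (pvIdxs o c 0).getD (pvBisect (pvIdxs o c 0) j 0 (pvIdxs o c 0).length) 0
            = j + pvFirstOcc (o.drop j) c := Option.some.inj hfind
        have hja : ¬ pvAdvance o c j = o.length := by omega
        rw [if_neg hja, if_neg hrne, hgd, hadv]
        exact ih (j + pvFirstOcc (o.drop j) c) (by omega)
      · have hnone : (pvIdxs o c 0).find? (fun p => decide (j ≤ p)) = none := by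
          rw [hidx, if_neg hcase]
        rw [hnone] at hfind
        have hre : pvBisect (pvIdxs o c 0) j 0 (pvIdxs o c 0).length = (pvIdxs o c 0).length := by
          by_contra hab
          rw [if_neg hab] at hfind
          simp at hfind
        have hf := pvFirstOcc_le (o.drop j) c
        have hja : pvAdvance o c j = o.length := by omega
        rw [if_pos hja, if_pos hre]
    · have hnil : pvIdxs o c 0 = [] := (pvIdxs_eq_nil o c 0).mpr hc
      have hget : (pvBuild PySem.Dict.empty 0 o).get? c = none := by
        rw [pvBuild_get]
        simp [PySem.Dict.get?_empty, hnil]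
      rw [pvALoop, pvBLoop, hget, pvSet_contains, decide_eq_false hc]
      simp only [Bool.not_false, if_true]
      exact ih j hj

-- ===== VERDICT (by name: the statement is the Claim_ definition above) =====
theorem string_in_order_spec : Claim_equal_string_in_order := by
  intro order string _
  unfold Spec_string_in_order string_in_order string_in_order_alt
  by_cases hs : string.toList.isEmpty = true
  · rw [if_pos hs, if_pos hs]
  · rw [if_neg hs, if_neg hs]
    by_cases ho : order.toList.isEmpty = true
    · rw [if_pos ho, if_pos ho]
    · rw [if_neg ho, if_neg ho]
      exact pvLoop_eq order.toList string.toList 0 (Nat.zero_le _)
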